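-- pv_equiv track=rewrite | github.com/rdmdelboni/RAG_SDS_MATRIX | src/sds/extractor.py | _extract_sections_fallback
-- ===== SOURCE A (Python) =====
-- def _extract_sections_fallback(text: str) -> dict[int, str]:
--     """Fallback section extraction using content heuristics.
--
--     Args:
--         text: Full document text
--
--     Returns:
--         Dictionary mapping section numbers to text
--     """
--     # Map keywords to likely section numbers
--     section_keywords = {
--         1: ["identification", "identificação", "produto"],
--         2: ["hazard", "perigo", "classificação"],
--         3: ["composition", "composição", "ingredientes"],
--         4: ["first aid", "primeiros", "socorros"],
--         5: ["fire fighting", "combate", "incêndio"],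
--         10: ["stability", "estabilidade", "reatividade"],
--         14: ["transport", "transporte"],
--     }
--
--     sections = {}
--     lines = text.split("\n")
--     current_section = None
--     current_text = []
--
--     for line in lines:
--         line_lower = line.lower()
--
--         # Check if line indicates a section start
--         detected_section = None
--         for sec_num, keywords in section_keywords.items():
--             if any(kw in line_lower for kw in keywords):
--                 detected_section = sec_num
--                 break
--
--         if detected_section:
--             # Save previous section
--             if current_section and current_text:
--                 sections[current_section] = "\n".join(current_text).strip()
--
--             # Start new section
--             current_section = detected_section
--             current_text = [line]
--         elif current_section:
--             current_text.append(line)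
--
--     # Save last section
--     if current_section and current_text:
--         sections[current_section] = "\n".join(current_text).strip()
--
--     return sections
-- ===== SOURCE B (Python) =====
-- _SECTION_KEYWORDS = [
--     (1, ["identification", "identificação", "produto"]),
--     (2, ["hazard", "perigo", "classificação"]),
--     (3, ["composition", "composição", "ingredientes"]),
--     (4, ["first aid", "primeiros", "socorros"]),
--     (5, ["fire fighting", "combate", "incêndio"]),
--     (10, ["stability", "estabilidade", "reatividade"]),
--     (14, ["transport", "transporte"]),
-- ]
--
--
-- def _detect(line: str):
--     line_lower = line.lower()
--     for sec_num, keywords in _SECTION_KEYWORDS: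
--         if any(kw in line_lower for kw in keywords):
--             return sec_num
--     return None
--
--
-- def _extract_sections_fallback(text: str) -> dict[int, str]:
--     """Fallback section extraction: one backwards pass collecting segments."""
--     segments = []  # (section number, its lines) in reverse document order
--     pending = []   # lines below the current position, in reverse order
--     for line in reversed(text.split("\n")):
--         sec = _detect(line)
--         if sec is None:
--             pending.append(line)
--         else:
--             segments.append((sec, [line] + pending[::-1]))
--             pending = []
--     sections = {}
--     for sec, seg in reversed(segments):
--         sections[sec] = "\n".join(seg).strip()
--     return sections
-- ===== Notes on version B (the rewrite author's own statement) =====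
-- stated objective: alternative
-- what changed: Replaces A's forward accumulator loop (current_section/current_text threaded through one pass with an end-of-loop flush) by a single backwards pass that emits complete (section, lines) segments as soon as a boundary line is seen, then builds the dict from the reversed segment list; keyword detection is factored into a helper.
import Mathlib
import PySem

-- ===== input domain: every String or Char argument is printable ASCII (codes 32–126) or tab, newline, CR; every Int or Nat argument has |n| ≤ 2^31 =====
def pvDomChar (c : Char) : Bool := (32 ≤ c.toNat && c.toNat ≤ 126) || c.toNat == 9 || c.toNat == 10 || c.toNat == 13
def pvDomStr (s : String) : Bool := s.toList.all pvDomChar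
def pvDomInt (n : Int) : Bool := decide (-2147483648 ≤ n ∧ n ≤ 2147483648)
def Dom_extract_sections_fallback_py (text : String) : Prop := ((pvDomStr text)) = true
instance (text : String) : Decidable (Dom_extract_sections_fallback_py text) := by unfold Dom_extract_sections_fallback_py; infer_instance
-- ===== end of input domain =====

-- B replaces A's forward accumulator loop by a backwards segment-emitting pass; objective: alternative decomposition (same cost).

-- ===== PORT A =====
-- the section_keywords dict of A (iterated in insertion order; values only read)
def pvKeywordsA : List (Int × List String) :=
  [(1, ["identification", "identificação", "produto"]),
   (2, ["hazard", "perigo", "classificação"]),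
   (3, ["composition", "composição", "ingredientes"]),
   (4, ["first aid", "primeiros", "socorros"]),
   (5, ["fire fighting", "combate", "incêndio"]),
   (10, ["stability", "estabilidade", "reatividade"]),
   (14, ["transport", "transporte"])]

-- A's inner 'for sec_num, keywords … break' loop: a latching fold (once set, kept)
def pvDetectA (lineLower : String) : Option Int :=
  pvKeywordsA.foldl
    (fun acc p =>
      match acc with
      | some _ => acc
      | none => if p.2.any (fun kw => PySem.Str.isIn kw lineLower) then some p.1 else none)
    none

-- A's save step 'if current_section and current_text: sections[current_section] = "\n".join(current_text).strip()',
-- which appears verbatim twice in A (in the loop and after it); state = (sections, current_section, current_text)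
def pvFinish (st : PySem.Dict Int String × Option Int × List String) : PySem.Dict Int String :=
  match st.2.1 with
  | some s => if st.2.2 ≠ [] then st.1.insert s (PySem.Str.strip (PySem.Str.join "\n" st.2.2)) else st.1
  | none => st.1

-- the body of A's 'for line in lines' loop
def pvStepA (st : PySem.Dict Int String × Option Int × List String) (line : String) :
    PySem.Dict Int String × Option Int × List String :=
  match pvDetectA (PySem.Str.lower line) with
  | some k => (pvFinish st, some k, [line])
  | none =>
      match st.2.1 with
      | some _ => (st.1, st.2.1, st.2.2 ++ [line])
      | none => (st.1, st.2.1, st.2.2)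

def extract_sections_fallback_py (text : String) : List (Int × String) :=
  let lines := (PySem.Str.split? text "\n").getD []
  (pvFinish (lines.foldl pvStepA (PySem.Dict.empty, none, []))).items

-- ===== PORT B =====
def pvKeywordsB : List (Int × List String) :=
  [(1, ["identification", "identificação", "produto"]),
   (2, ["hazard", "perigo", "classificação"]),
   (3, ["composition", "composição", "ingredientes"]),
   (4, ["first aid", "primeiros", "socorros"]),
   (5, ["fire fighting", "combate", "incêndio"]),
   (10, ["stability", "estabilidade", "reatividade"]),
   (14, ["transport", "transporte"])]

-- Source B's _detect: first section (in list order) with a matching keyword, early return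
def pvDetectGo (lineLower : String) : List (Int × List String) → Option Int
  | [] => none
  | p :: rest =>
      if p.2.any (fun kw => PySem.Str.isIn kw lineLower) then some p.1 else pvDetectGo lineLower rest

def pvDetectB (line : String) : Option Int :=
  pvDetectGo (PySem.Str.lower line) pvKeywordsB

-- Source B's backwards loop body; state = (pending, segments), both appended at the end as in Python
def pvStepB (st : List String × List (Int × List String)) (line : String) :
    List String × List (Int × List String) :=
  match pvDetectB line with
  | none => (st.1 ++ [line], st.2)
  | some k => ([], st.2 ++ [(k, [line] ++ st.1.reverse)])

def extract_sections_fallback_py_alt (text : String) : List (Int × String) :=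
  let lines := (PySem.Str.split? text "\n").getD []
  let st := lines.reverse.foldl pvStepB ([], [])
  let sections := st.2.reverse.foldl
    (fun d (p : Int × List String) => d.insert p.1 (PySem.Str.strip (PySem.Str.join "\n" p.2)))
    PySem.Dict.empty
  sections.items

-- ===== PRECONDITION & SPEC =====
def Spec_extract_sections_fallback_py (text : String) (out : List (Int × String)) : Prop := out = extract_sections_fallback_py_alt text
instance (text : String) (out : List (Int × String)) : Decidable (Spec_extract_sections_fallback_py text out) := by unfold Spec_extract_sections_fallback_py; infer_instance

-- ===== CLAIM (what is proved, stated in full; the proofs are below) =====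
def Claim_equal_extract_sections_fallback_py : Prop := ∀ (text : String), Dom_extract_sections_fallback_py text → Spec_extract_sections_fallback_py text (extract_sections_fallback_py text)

-- ===== LEMMAS AND PROOFS =====

-- the two detection routines agree
theorem pvDetect_eq (line : String) : pvDetectA (PySem.Str.lower line) = pvDetectB line := by
  simp only [pvDetectA, pvDetectB, pvKeywordsA, pvKeywordsB, pvDetectGo, List.foldl]
  split_ifs <;> rfl

theorem pvStepA_some (st : PySem.Dict Int String × Option Int × List String) (line : String)
    (k : Int) (h : pvDetectB line = some k) :
    pvStepA st line = (pvFinish st, some k, [line]) := by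
  unfold pvStepA; rw [pvDetect_eq, h]

theorem pvStepA_none (st : PySem.Dict Int String × Option Int × List String) (line : String)
    (h : pvDetectB line = none) :
    pvStepA st line = (st.1, st.2.1, match st.2.1 with | some _ => st.2.2 ++ [line] | none => st.2.2) := by
  unfold pvStepA; rw [pvDetect_eq, h]
  rcases st with ⟨d, cs, ct⟩; cases cs <;> rfl

theorem pvFinish_some (d : PySem.Dict Int String) (s : Int) (acc : List String) (h : acc ≠ []) :
    pvFinish (d, some s, acc) = d.insert s (PySem.Str.strip (PySem.Str.join "\n" acc)) := by
  unfold pvFinish; exact if_pos h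

-- canonical segmentation of a line list into (section, segment-lines) pairs
def pvSegsFrom (k : Int) (acc : List String) : List String → List (Int × List String)
  | [] => [(k, acc)]
  | l :: ls =>
      match pvDetectB l with
      | some k' => (k, acc) :: pvSegsFrom k' [l] ls
      | none => pvSegsFrom k (acc ++ [l]) ls

def pvSegs : List String → List (Int × List String)
  | [] => []
  | l :: ls =>
      match pvDetectB l with
      | some k => pvSegsFrom k [l] ls
      | none => pvSegs ls

-- lines before the first boundary
def pvPref : List String → List String
  | [] => []
  | l :: ls => match pvDetectB l with | some _ => [] | none => l :: pvPref ls

def pvIns (d : PySem.Dict Int String) (ss : List (Int × List String)) : PySem.Dict Int String :=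
  ss.foldl (fun d p => d.insert p.1 (PySem.Str.strip (PySem.Str.join "\n" p.2))) d

theorem pvSegsFrom_eq (ls : List String) :
    ∀ k acc, pvSegsFrom k acc ls = (k, acc ++ pvPref ls) :: pvSegs ls := by
  induction ls with
  | nil => intro k acc; simp [pvSegsFrom, pvPref, pvSegs]
  | cons l ls ih =>
      intro k acc
      cases h : pvDetectB l with
      | some k' => simp [pvSegsFrom, pvPref, pvSegs, h, ih]
      | none => simp [pvSegsFrom, pvPref, pvSegs, h, ih]

-- A's fold, started in a running section, inserts exactly the segments of pvSegsFrom
theorem pvA_some (ls : List String) :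
    ∀ (d : PySem.Dict Int String) (s : Int) (acc : List String), acc ≠ [] →
    pvFinish (ls.foldl pvStepA (d, some s, acc)) = pvIns d (pvSegsFrom s acc ls) := by
  induction ls with
  | nil =>
      intro d s acc h
      rw [List.foldl_nil, pvFinish_some d s acc h]
      simp [pvSegsFrom, pvIns]
  | cons l ls ih =>
      intro d s acc h
      rw [List.foldl_cons]
      cases hd : pvDetectB l with
      | some k =>
          rw [pvStepA_some _ _ _ hd, ih _ k [l] (by simp), pvFinish_some d s acc h]
          simp only [pvSegsFrom, hd, pvIns, List.foldl_cons]
      | none =>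
          rw [pvStepA_none _ _ hd]
          simp only [pvSegsFrom, hd]
          exact ih d s (acc ++ [l]) (by simp)

-- A's whole computation = inserting the canonical segments
theorem pvA_eq (ls : List String) :
    pvFinish (ls.foldl pvStepA (PySem.Dict.empty, none, [])) = pvIns PySem.Dict.empty (pvSegs ls) := by
  induction ls with
  | nil => simp [pvSegs, pvIns, pvFinish]
  | cons l ls ih =>
      rw [List.foldl_cons]
      cases hd : pvDetectB l with
      | some k =>
          rw [pvStepA_some _ _ _ hd]
          simp only [pvSegs, hd]
          exact pvA_some ls _ k [l] (by simp)
      | none =>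
          rw [pvStepA_none _ _ hd]
          simp only [pvSegs, hd]
          exact ih

-- B's backwards pass: pending = reversed prefix, segments = reversed segments
theorem pvB_eq (ls : List String) :
    (ls.reverse.foldl pvStepB ([], [])).1 = (pvPref ls).reverse ∧
    (ls.reverse.foldl pvStepB ([], [])).2.reverse = pvSegs ls := by
  rw [List.foldl_reverse]
  induction ls with
  | nil => simp [pvPref, pvSegs]
  | cons l ls ih =>
      rw [List.foldr_cons]
      rcases hF : List.foldr (fun x y => pvStepB y x) ([], []) ls with ⟨p, ss⟩
      rw [hF] at ih
      cases hd : pvDetectB l with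
      | some k =>
          refine ⟨?_, ?_⟩
          · simp [pvStepB, hd, pvPref]
          · simp only [pvStepB, hd, List.reverse_append, List.reverse_cons, pvSegs]
            rw [pvSegsFrom_eq]
            simp only at ih
            simp [ih.1, ih.2]
      | none =>
          refine ⟨?_, ?_⟩
          · simp only [pvStepB, hd, pvPref]
            simp only at ih
            simp [ih.1]
          · simp only [pvStepB, hd, pvSegs]
            simp only at ih
            exact ih.2

-- ===== VERDICT (by name: the statement is the Claim_ definition above) =====
theorem extract_sections_fallback_py_spec : Claim_equal_extract_sections_fallback_py := by
  intro text _
  unfold Spec_extract_sections_fallback_py extract_sections_fallback_py extract_sections_fallback_py_alt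
  show (pvFinish (List.foldl pvStepA (PySem.Dict.empty, (none : Option Int), ([] : List String))
          ((PySem.Str.split? text "\n").getD []))).items =
    (List.foldl (fun d (p : Int × List String) => d.insert p.1 (PySem.Str.strip (PySem.Str.join "\n" p.2)))
        PySem.Dict.empty
        ((List.foldl pvStepB ([], []) ((PySem.Str.split? text "\n").getD []).reverse).2.reverse)).items
  rw [pvA_eq, ← (pvB_eq ((PySem.Str.split? text "\n").getD [])).2]
  rfl
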